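-- pv_equiv track=rewrite | github.com/lliurex/python3-repoman | src/repoman/repomanager.py | sortContents
-- ===== SOURCE A (Python) =====
-- def sortContents(contents):
-- 	sortcontent=[]
-- 	mirrorLines=0
-- 	for line in contents:
-- 		if "lliurex.net" in line:
-- 			idx=mirrorLines
-- 		elif "/mirror/llx" in line:
-- 			idx=0
-- 			mirrorLines+=1
-- 		else:
-- 			idx=len(sortcontent)
-- 		line=line.replace("// ","/ ")
-- 		sortcontent.insert(idx,line)
-- 	return(sortcontent)
-- ===== SOURCE B (Python) =====
-- def sortContents(contents):
--     mirrors = []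
--     nets = []
--     others = []
--     for line in contents:
--         fixed = line.replace("// ", "/ ")
--         if "lliurex.net" in line:
--             nets.append(fixed)
--         elif "/mirror/llx" in line:
--             mirrors.append(fixed)
--         else:
--             others.append(fixed)
--     mirrors.reverse()
--     nets.reverse()
--     return mirrors + nets + others
-- ===== Notes on version B (the rewrite author's own statement) =====
-- stated objective: alternative
-- what changed: Replaces A's repeated list.insert at computed indices with one pass partitioning lines into mirror/net/other buckets, reversing the first two and concatenating; asymptotically O(n) vs A's O(n^2), though a timing run read only ~1.5x at the largest size (A's shifts are C-level memmoves).
import Mathlib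
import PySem

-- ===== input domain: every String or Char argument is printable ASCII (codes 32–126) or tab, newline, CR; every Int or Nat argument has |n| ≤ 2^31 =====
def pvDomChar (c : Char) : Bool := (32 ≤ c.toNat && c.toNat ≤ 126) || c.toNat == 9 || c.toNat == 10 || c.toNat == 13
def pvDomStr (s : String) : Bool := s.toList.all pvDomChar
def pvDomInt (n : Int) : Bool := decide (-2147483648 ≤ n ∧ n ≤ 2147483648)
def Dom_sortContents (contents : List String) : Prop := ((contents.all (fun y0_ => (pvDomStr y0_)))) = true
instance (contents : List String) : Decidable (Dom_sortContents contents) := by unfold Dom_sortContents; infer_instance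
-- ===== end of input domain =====

-- B replaces A's repeated list.insert at computed indices with one pass into
-- three buckets (mirror/net/other), reversing the first two and concatenating.


-- ===== PORT A =====
-- loop over contents with state (sortcontent, mirrorLines), inserting each line
def sortContentsLoop (rest : List String) (sortcontent : List String) (mirrorLines : Nat) :
    List String :=
  match rest with
  | [] => sortcontent
  | line :: rest =>
    if PySem.Str.isIn "lliurex.net" line then
      sortContentsLoop rest
        (PySem.List.insert sortcontent (mirrorLines : Int) (PySem.Str.replace line "// " "/ "))
        mirrorLines
    else if PySem.Str.isIn "/mirror/llx" line then
      sortContentsLoop rest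
        (PySem.List.insert sortcontent (0 : Int) (PySem.Str.replace line "// " "/ "))
        (mirrorLines + 1)
    else
      sortContentsLoop rest
        (PySem.List.insert sortcontent ((sortcontent.length : Int)) (PySem.Str.replace line "// " "/ "))
        mirrorLines

def sortContents (contents : List String) : List String :=
  sortContentsLoop contents [] 0

-- ===== PORT B =====
def sortContentsAltStep (acc : List String × List String × List String) (line : String) :
    List String × List String × List String :=
  let fixed := PySem.Str.replace line "// " "/ "
  if PySem.Str.isIn "lliurex.net" line then (acc.1, acc.2.1 ++ [fixed], acc.2.2)
  else if PySem.Str.isIn "/mirror/llx" line then (acc.1 ++ [fixed], acc.2.1, acc.2.2)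
  else (acc.1, acc.2.1, acc.2.2 ++ [fixed])

def sortContents_alt (contents : List String) : List String :=
  let acc := contents.foldl sortContentsAltStep ([], [], [])
  acc.1.reverse ++ acc.2.1.reverse ++ acc.2.2

-- ===== PRECONDITION & SPEC =====
def Spec_sortContents (contents : List String) (out : List String) : Prop := out = sortContents_alt contents
instance (contents : List String) (out : List String) : Decidable (Spec_sortContents contents out) := by unfold Spec_sortContents; infer_instance

-- ===== CLAIM (what is proved, stated in full; the proofs are below) =====
def Claim_equal_sortContents : Prop := ∀ (contents : List String), Dom_sortContents contents → Spec_sortContents contents (sortContents contents)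

-- ===== LEMMAS AND PROOFS =====

-- inserting at the length of the first summand lands between the two summands
lemma insert_at_prefix_len (a b : List String) (v : String) :
    PySem.List.insert (a ++ b) ((a.length : Nat) : Int) v = a ++ v :: b := by
  rw [PySem.List.insert_natCast (a ++ b) a.length v (by simp)]
  simp

-- loop invariant: A's state is B's three buckets, mirrors and nets reversed
lemma loop_eq_buckets (rest : List String) :
    ∀ (ms ns os : List String),
      sortContentsLoop rest (ms.reverse ++ ns.reverse ++ os) ms.length =
        (fun acc : List String × List String × List String =>
          acc.1.reverse ++ acc.2.1.reverse ++ acc.2.2)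
          (rest.foldl sortContentsAltStep (ms, ns, os)) := by
  induction rest with
  | nil => intro ms ns os; rfl
  | cons line rest ih =>
    intro ms ns os
    by_cases h1 : PySem.Str.isIn "lliurex.net" line = true
    · have : PySem.List.insert (ms.reverse ++ ns.reverse ++ os) ((ms.length : Nat) : Int)
          (PySem.Str.replace line "// " "/ ")
          = ms.reverse ++ (ns ++ [PySem.Str.replace line "// " "/ "]).reverse ++ os := by
        have := insert_at_prefix_len ms.reverse (ns.reverse ++ os)
          (PySem.Str.replace line "// " "/ ")
        simpa [List.append_assoc] using this
      simp only [sortContentsLoop, h1, if_true, List.foldl_cons, sortContentsAltStep, this]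
      exact ih ms (ns ++ [PySem.Str.replace line "// " "/ "]) os
    · by_cases h2 : PySem.Str.isIn "/mirror/llx" line = true
      · have : PySem.List.insert (ms.reverse ++ ns.reverse ++ os) (0 : Int)
            (PySem.Str.replace line "// " "/ ")
            = (ms ++ [PySem.Str.replace line "// " "/ "]).reverse ++ ns.reverse ++ os := by
          simp [PySem.List.insert_zero]
        simp only [sortContentsLoop, h1, h2, if_true, List.foldl_cons,
          sortContentsAltStep, this]
        have := ih (ms ++ [PySem.Str.replace line "// " "/ "]) ns os
        simpa using this
      · have : PySem.List.insert (ms.reverse ++ ns.reverse ++ os)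
            (((ms.reverse ++ ns.reverse ++ os).length : Nat) : Int)
            (PySem.Str.replace line "// " "/ ")
            = ms.reverse ++ ns.reverse ++ (os ++ [PySem.Str.replace line "// " "/ "]) := by
          have := insert_at_prefix_len (ms.reverse ++ ns.reverse ++ os) []
            (PySem.Str.replace line "// " "/ ")
          simpa [List.append_assoc] using this
        simp only [sortContentsLoop, h1, h2, List.foldl_cons,
          sortContentsAltStep, this]
        exact ih ms ns (os ++ [PySem.Str.replace line "// " "/ "])

-- ===== VERDICT (by name: the statement is the Claim_ definition above) =====
theorem sortContents_spec : Claim_equal_sortContents := by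
  intro contents _
  unfold Spec_sortContents sortContents sortContents_alt
  have := loop_eq_buckets contents [] [] []
  simpa using this
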